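-- pv_equiv track=rewrite | github.com/canonicio/inevitable-cloud-stack | inevitable/core-identity/modules/core/validators.py | validate_safe_html
-- ===== SOURCE A (Python) =====
-- def validate_safe_html(value: str, field_name: str = "input") -> str:
--     """Validate HTML content with restricted tags"""
--     if not value:
--         return value
--
--     # Only allow very basic HTML tags for rich text
--     allowed_tags = ['p', 'br', 'strong', 'em', 'u', 'ol', 'ul', 'li']
--     import html
--
--     # First escape all HTML
--     escaped = html.escape(value)
--
--     # Then selectively unescape allowed tags
--     for tag in allowed_tags:
--         escaped = escaped.replace(f'&lt;{tag}&gt;', f'<{tag}>')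
--         escaped = escaped.replace(f'&lt;/{tag}&gt;', f'</{tag}>')
--
--     return escaped
-- ===== SOURCE B (Python) =====
-- def validate_safe_html(value: str, field_name: str = "input") -> str:
--     """Validate HTML content with restricted tags.
--
--     Single pass over the original string: allowed tags are copied verbatim,
--     every other character is escaped on the spot (no intermediate escaped
--     string, no 16 replace passes).
--     """
--     if not value:
--         return value
--
--     allowed = ('p', 'br', 'strong', 'em', 'u', 'ol', 'ul', 'li')
--     esc = {'&': '&amp;', '<': '&lt;', '>': '&gt;', '"': '&quot;', "'": '&#x27;'}
--
--     out = []
--     i, n = 0, len(value)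
--     while i < n:
--         c = value[i]
--         if c == '<':
--             j = value.find('>', i + 1)
--             if j != -1:
--                 inner = value[i + 1:j]
--                 name = inner[1:] if inner.startswith('/') else inner
--                 if name in allowed:
--                     out.append(value[i:j + 1])
--                     i = j + 1
--                     continue
--         out.append(esc.get(c, c))
--         i += 1
--     return ''.join(out)
-- ===== Notes on version B (the rewrite author's own statement) =====
-- stated objective: alternative
-- what changed: A escapes the whole string and then runs 16 sequential .replace passes to un-escape whitelisted tags; B makes a single left-to-right pass over the original string, copying an allowed <tag>/</tag> verbatim and escaping every other character on the spot, never building the escaped intermediate.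
import Mathlib
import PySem

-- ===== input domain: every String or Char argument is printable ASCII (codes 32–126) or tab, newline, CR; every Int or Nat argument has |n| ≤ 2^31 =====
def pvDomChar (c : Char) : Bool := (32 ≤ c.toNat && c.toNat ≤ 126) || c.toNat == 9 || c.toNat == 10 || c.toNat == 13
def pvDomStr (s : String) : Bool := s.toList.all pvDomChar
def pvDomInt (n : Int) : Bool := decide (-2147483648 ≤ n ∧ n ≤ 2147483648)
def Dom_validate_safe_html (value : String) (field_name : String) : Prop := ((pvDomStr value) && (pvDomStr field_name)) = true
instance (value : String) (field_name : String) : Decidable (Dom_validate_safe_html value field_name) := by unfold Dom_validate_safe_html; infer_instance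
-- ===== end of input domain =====

-- B replaces A's escape-everything-then-16-replace-passes by ONE left-to-right pass over the
-- original string (allowed tags copied verbatim, everything else escaped on the spot); same value.

-- ===== PORT A =====

-- exact per-character table of Python's html.escape(value) with quote=True (stdlib call of A)
def escCharA (c : Char) : List Char :=
  if c = '&' then ['&','a','m','p',';']
  else if c = '<' then ['&','l','t',';']
  else if c = '>' then ['&','g','t',';']
  else if c = '"' then ['&','q','u','o','t',';']
  else if c = '\'' then ['&','#','x','2','7',';']
  else [c]

def htmlEscape (s : String) : String := String.ofList (s.toList.flatMap escCharA)

def validate_safe_html (value : String) (field_name : String) : String :=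
  if value = "" then value
  else
    let allowed_tags : List String := ["p", "br", "strong", "em", "u", "ol", "ul", "li"]
    let escaped := htmlEscape value
    allowed_tags.foldl (fun e tag =>
      PySem.Str.replace
        (PySem.Str.replace e ("&lt;" ++ tag ++ "&gt;") ("<" ++ tag ++ ">"))
        ("&lt;/" ++ tag ++ "&gt;") ("</" ++ tag ++ ">")) escaped

-- ===== PORT B =====

def allowedB : List (List Char) :=
  [['p'], ['b','r'], ['s','t','r','o','n','g'], ['e','m'], ['u'], ['o','l'], ['u','l'], ['l','i']]

-- B's esc dict (esc.get(c, c))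
def escB (c : Char) : List Char :=
  if c = '&' then ['&','a','m','p',';']
  else if c = '<' then ['&','l','t',';']
  else if c = '>' then ['&','g','t',';']
  else if c = '"' then ['&','q','u','o','t',';']
  else if c = '\'' then ['&','#','x','2','7',';']
  else [c]

-- Source B's tag test after a '<': find the next '>', slice out `inner`, strip a leading '/', whitelist check
def tryTag (cs : List Char) : Option (List Char) :=
  let inner := cs.takeWhile (fun c => !(c == '>'))
  if inner.length < cs.length then            -- value.find('>', i+1) != -1
    let name := if inner.take 1 = ['/'] then inner.drop 1 else inner
    if allowedB.contains name then some inner else none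
  else none

-- Source B's while loop over the characters (i advances either past a whole allowed tag or by one)
def gscan : List Char → List Char
  | [] => []
  | c :: cs =>
    if c = '<' then
      match tryTag cs with
      | some inner => ('<' :: (inner ++ ['>'])) ++ gscan (cs.drop (inner.length + 1))
      | none => escB '<' ++ gscan cs
    else escB c ++ gscan cs
termination_by l => l.length
decreasing_by all_goals simp [List.length_drop]

def validate_safe_html_alt (value : String) (field_name : String) : String :=
  if value = "" then value
  else String.ofList (gscan value.toList)

-- ===== PRECONDITION & SPEC =====
def Spec_validate_safe_html (value : String) (field_name : String) (out : String) : Prop := out = validate_safe_html_alt value field_name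
instance (value : String) (field_name : String) (out : String) : Decidable (Spec_validate_safe_html value field_name out) := by unfold Spec_validate_safe_html; infer_instance

-- ===== CLAIM (what is proved, stated in full; the proofs are below) =====
def Claim_equal_validate_safe_html : Prop := ∀ (value : String) (field_name : String), Dom_validate_safe_html value field_name → Spec_validate_safe_html value field_name (validate_safe_html value field_name)

-- ===== LEMMAS AND PROOFS =====

-- The 16 escaped patterns of A, in the order A's loop replaces them (open tag, close tag, next tag …)
def forms : List (List Char) :=
  [['p'], ['/','p'], ['b','r'], ['/','b','r'],
   ['s','t','r','o','n','g'], ['/','s','t','r','o','n','g'],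
   ['e','m'], ['/','e','m'], ['u'], ['/','u'],
   ['o','l'], ['/','o','l'], ['u','l'], ['/','u','l'],
   ['l','i'], ['/','l','i']]

def form (k : Nat) : List Char := forms.getD k []

-- Token view of the original string: an allowed-tag occurrence, or a single character
inductive Tok
  | tag : List Char → Tok
  | chr : Char → Tok

def tokenize : List Char → List Tok
  | [] => []
  | c :: cs =>
    if c = '<' then
      match tryTag cs with
      | some inner => .tag inner :: tokenize (cs.drop (inner.length + 1))
      | none => .chr '<' :: tokenize cs
    else .chr c :: tokenize cs
termination_by l => l.length
decreasing_by all_goals simp [List.length_drop]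

-- How a token is printed after the first k of A's 16 replace steps have run
def render (k : Nat) : Tok → List Char
  | .tag inner => if forms.idxOf inner < k then '<' :: (inner ++ ['>'])
                  else ['&','l','t',';'] ++ inner ++ ['&','g','t',';']
  | .chr c => escCharA c

-- Clean recursive form of Python str.replace (nonempty pattern o :: old')
def rep (o : Char) (old' new : List Char) : List Char → List Char
  | [] => []
  | c :: t =>
    if (o :: old').isPrefixOf (c :: t) then new ++ rep o old' new (t.drop old'.length)
    else c :: rep o old' new t
termination_by l => l.length
decreasing_by all_goals simp [List.length_drop]

theorem replace_go_eq (o : Char) (old' new : List Char) :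
    ∀ (fuel : Nat) (l acc : List Char), l.length ≤ fuel →
      PySem.Chars.replace.go (o :: old') new fuel l acc = acc.reverse ++ rep o old' new l := by
  intro fuel
  induction fuel with
  | zero =>
    intro l acc hl
    have : l = [] := List.length_eq_zero_iff.mp (Nat.le_zero.mp hl)
    subst this
    simp [PySem.Chars.replace.go, rep]
  | succ fuel ih =>
    intro l acc hl
    match l with
    | [] => simp [PySem.Chars.replace.go, rep]
    | c :: t =>
      rw [PySem.Chars.replace.go]
      by_cases hp : (o :: old').isPrefixOf (c :: t)
      · rw [if_pos hp, rep, if_pos hp]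
        have hlen : (List.drop (o :: old').length (c :: t)).length ≤ fuel := by
          simp at hl ⊢; omega
        rw [ih _ _ hlen]
        simp [List.drop_succ_cons]
      · rw [if_neg hp, rep, if_neg hp]
        have hlen : t.length ≤ fuel := by simp at hl; omega
        rw [ih _ _ hlen]
        simp

theorem replace_eq_rep (o : Char) (old' new s : List Char) :
    PySem.Chars.replace s (o :: old') new = rep o old' new s := by
  rw [PySem.Chars.replace]
  simp only [List.isEmpty_cons, if_neg Bool.false_ne_true]
  simpa using replace_go_eq o old' new s.length s [] le_rfl

theorem prefix_append_cases {α : Type} {p q s : List α} (h : p <+: q ++ s) : p <+: q ∨ q <+: p := by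
  induction p generalizing q with
  | nil => exact Or.inl (List.nil_prefix)
  | cons a p' ih =>
    match q with
    | [] => exact Or.inr (List.nil_prefix)
    | b :: q' =>
      rw [List.cons_append, List.cons_prefix_cons] at h
      obtain ⟨rfl, h'⟩ := h
      rcases ih h' with h1 | h1
      · exact Or.inl (List.cons_prefix_cons.mpr ⟨rfl, h1⟩)
      · exact Or.inr (List.cons_prefix_cons.mpr ⟨rfl, h1⟩)

theorem noPrefix_twoWay {α : Type} {p q : List α} (s : List α) (h1 : ¬ p <+: q) (h2 : ¬ q <+: p) :
    ¬ p <+: q ++ s := fun h => (prefix_append_cases h).elim h1 h2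

def skipOK (p q : List Char) : Bool :=
  q.tails.all (fun t => t.isEmpty || (!(p.isPrefixOf t) && !(t.isPrefixOf p)))

theorem rep_skip' (o : Char) (old' new : List Char) (q s : List Char)
    (h : ∀ t, t <:+ q → t ≠ [] → ¬ (o :: old') <+: t ++ s) :
    rep o old' new (q ++ s) = q ++ rep o old' new s := by
  induction q with
  | nil => simp
  | cons a q' ih =>
    have hfull : ¬ (o :: old').isPrefixOf ((a :: q') ++ s) := by
      rw [List.isPrefixOf_iff_prefix]
      exact h (a :: q') List.suffix_rfl (by simp)
    rw [List.cons_append, rep, if_neg (by rw [← List.cons_append]; exact hfull)]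
    rw [ih (fun t ht hne => h t (ht.trans (List.suffix_cons a q')) hne)]
    simp

theorem rep_skip (o : Char) (old' new : List Char) (q s : List Char)
    (h : skipOK (o :: old') q = true) :
    rep o old' new (q ++ s) = q ++ rep o old' new s := by
  apply rep_skip'
  intro t ht hne
  have hmem : t ∈ q.tails := (List.mem_tails t q).mpr ht
  have hb := List.all_eq_true.mp h t hmem
  simp only [List.isEmpty_iff, Bool.or_eq_true, Bool.and_eq_true, Bool.not_eq_true'] at hb
  rcases hb with h0 | ⟨h1, h2⟩
  · exact absurd h0 hne
  · exact noPrefix_twoWay s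
      (by rw [← List.isPrefixOf_iff_prefix]; simp [h1])
      (by rw [← List.isPrefixOf_iff_prefix]; simp [h2])

theorem escB_eq (c : Char) : escB c = escCharA c := by
  unfold escB escCharA
  split_ifs <;> rfl

theorem escCharA_self_ne (x : Char) (h : escCharA x = [x]) : x ≠ '&' ∧ x ≠ '<' := by
  constructor <;> rintro rfl <;> exact absurd h (by decide)

theorem dropWhile_head_not (p : Char → Bool) :
    ∀ (cs : List Char) (d : Char) (r : List Char), cs.dropWhile p = d :: r → p d = false := by
  intro cs
  induction cs with
  | nil => intro d r h; simp at h
  | cons a t ih =>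
    intro d r h
    rw [List.dropWhile_cons] at h
    by_cases hp : p a = true
    · rw [if_pos hp] at h; exact ih d r h
    · rw [if_neg hp] at h
      cases h
      simpa using hp

-- tryTag succeeded: inner is one of the 16 forms and cs splits as inner ++ '>' :: rest
theorem tryTag_some (cs inner : List Char) (h : tryTag cs = some inner) :
    inner ∈ forms ∧ cs = inner ++ '>' :: cs.drop (inner.length + 1) := by
  unfold tryTag at h
  simp only [] at h
  by_cases hlen : (cs.takeWhile (fun c => !(c == '>'))).length < cs.length
  · rw [if_pos hlen] at h
    by_cases hc : allowedB.contains
        (if (cs.takeWhile (fun c => !(c == '>'))).take 1 = ['/']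
         then (cs.takeWhile (fun c => !(c == '>'))).drop 1
         else cs.takeWhile (fun c => !(c == '>'))) = true
    · rw [if_pos hc] at h
      have hEq : inner = cs.takeWhile (fun c => !(c == '>')) := by
        have := h; simp only [Option.some.injEq] at this; exact this.symm
      rw [← hEq] at hlen hc
      have hsplit : inner ++ cs.dropWhile (fun c => !(c == '>')) = cs := by
        rw [hEq]; exact List.takeWhile_append_dropWhile
      have hdw : cs.dropWhile (fun c => !(c == '>')) ≠ [] := by
        intro h0
        rw [h0, List.append_nil] at hsplit
        rw [hsplit] at hlen
        exact lt_irrefl _ hlen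
      obtain ⟨d, r, hdr⟩ : ∃ d r, cs.dropWhile (fun c => !(c == '>')) = d :: r := by
        rcases hx : cs.dropWhile (fun c => !(c == '>')) with _ | ⟨d, r⟩
        · exact absurd hx hdw
        · exact ⟨d, r, rfl⟩
      have hd : d = '>' := by
        have hh := dropWhile_head_not (fun c => !(c == '>')) cs d r hdr
        simpa using hh
      subst hd
      have hcs : cs = inner ++ '>' :: r := by rw [← hsplit, hdr]
      have hdrop : cs.drop (inner.length + 1) = r := by
        rw [hcs, show inner.length + 1 = (inner ++ ['>']).length by simp,
          show inner ++ '>' :: r = (inner ++ ['>']) ++ r by simp]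
        exact List.drop_left
      refine ⟨?_, by rw [hdrop]; exact hcs⟩
      have hall : ∀ x ∈ allowedB, x ∈ forms ∧ '/' :: x ∈ forms := by decide
      by_cases hsl : inner.take 1 = ['/']
      · rw [if_pos hsl] at hc
        have hmem := List.contains_iff_mem.mp hc
        have hin : inner = '/' :: inner.drop 1 := by
          rcases inner with _ | ⟨b, ib⟩
          · simp at hsl
          · simp at hsl
            rw [hsl]
            simp
        rw [hin]
        exact (hall _ hmem).2
      · rw [if_neg hsl] at hc
        exact (hall _ (List.contains_iff_mem.mp hc)).1
    · rw [if_neg hc] at h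
      exact absurd h (by simp)
  · rw [if_neg hlen] at h
    exact absurd h (by simp)

-- tryTag failed: no form followed by '>' is a prefix of cs
set_option maxRecDepth 10000 in
theorem tryTag_none (cs : List Char) (h : tryTag cs = none) :
    ∀ f ∈ forms, ¬ (f ++ ['>']) <+: cs := by
  intro f hf hpre
  obtain ⟨r, hr⟩ := hpre
  rw [List.append_assoc] at hr
  -- compute the takeWhile on this shape
  have hfchars : ∀ x ∈ f, (!(x == '>')) = true := by
    have hb : forms.all (fun f => f.all (fun x => !(x == '>'))) = true := by rfl
    exact fun x hx => List.all_eq_true.mp (List.all_eq_true.mp hb f hf) x hx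
  have htw : cs.takeWhile (fun c => !(c == '>')) = f := by
    rw [← hr, List.takeWhile_append_of_pos hfchars]
    simp
  have hlen : f.length < cs.length := by
    rw [← hr]
    simp
  have hname : allowedB.contains (if f.take 1 = ['/'] then f.drop 1 else f) = true := by
    have hb : forms.all (fun f => allowedB.contains (if f.take 1 = ['/'] then f.drop 1 else f)) = true := by rfl
    exact List.all_eq_true.mp hb f hf
  have : tryTag cs = some f := by
    unfold tryTag
    simp only []
    rw [htw, if_pos hlen, if_pos hname]
  rw [this] at h
  exact absurd h (by simp)

theorem tokenize_nil : tokenize [] = [] := by rw [tokenize]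

theorem tokenize_lt_some {cs inner : List Char} (h : tryTag cs = some inner) :
    tokenize ('<' :: cs) = .tag inner :: tokenize (cs.drop (inner.length + 1)) := by
  rw [tokenize]; simp [h]

theorem tokenize_lt_none {cs : List Char} (h : tryTag cs = none) :
    tokenize ('<' :: cs) = .chr '<' :: tokenize cs := by
  rw [tokenize]; simp [h]

theorem tokenize_cons {c : Char} {cs : List Char} (h : ¬ c = '<') :
    tokenize (c :: cs) = .chr c :: tokenize cs := by
  rw [tokenize]; simp [h]

theorem gscan_nil : gscan [] = [] := by rw [gscan]

theorem gscan_lt_some {cs inner : List Char} (h : tryTag cs = some inner) :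
    gscan ('<' :: cs) = ('<' :: (inner ++ ['>'])) ++ gscan (cs.drop (inner.length + 1)) := by
  rw [gscan]; simp [h]

theorem gscan_lt_none {cs : List Char} (h : tryTag cs = none) :
    gscan ('<' :: cs) = escB '<' ++ gscan cs := by
  rw [gscan]; simp [h]

theorem gscan_cons {c : Char} {cs : List Char} (h : ¬ c = '<') :
    gscan (c :: cs) = escB c ++ gscan cs := by
  rw [gscan]; simp [h]

theorem np1 {a b : Char} {p r : List Char} (h : a ≠ b) : ¬ (a :: p) <+: (b :: r) :=
  fun hp => h (List.cons_prefix_cons.mp hp).1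

theorem np2 {a b b' : Char} {p r : List Char} (h : b ≠ b') : ¬ (a :: b :: p) <+: (a :: b' :: r) :=
  fun hp => h (List.cons_prefix_cons.mp (List.cons_prefix_cons.mp hp).2).1

-- the key "no accidental pattern" lemma: a pattern body prefix in the rendered stream
-- forces the literal tag in the original string
theorem renderS : ∀ (X : List Char), (∀ x ∈ X, escCharA x = [x]) →
    ∀ (w : List Char) (k : Nat),
      (X ++ ['&','g','t',';']) <+: ((tokenize w).flatMap (render k)) → (X ++ ['>']) <+: w := by
  intro X
  induction X with
  | nil =>
    intro _ w k h
    simp only [List.nil_append] at h ⊢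
    match w with
    | [] => rw [tokenize_nil] at h; simp at h
    | c :: cs =>
      by_cases hc : c = '<'
      · subst hc
        cases htt : tryTag cs with
        | some inner =>
          rw [tokenize_lt_some htt, List.flatMap_cons] at h
          by_cases hidx : forms.idxOf inner < k
          · simp only [render, if_pos hidx, List.cons_append, List.append_assoc] at h
            exact absurd h (np1 (by decide))
          · simp only [render, if_neg hidx, List.cons_append, List.append_assoc,
              List.nil_append] at h
            exact absurd h (np2 (by decide))
        | none =>
          rw [tokenize_lt_none htt, List.flatMap_cons] at h
          simp only [render, escCharA, if_neg (by decide : ¬ ('<' : Char) = '&')] at h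
          exact absurd h (np2 (by decide))
      · rw [tokenize_cons hc, List.flatMap_cons] at h
        simp only [render] at h
        by_cases h1 : c = '&'
        · subst h1
          simp only [escCharA] at h
          exact absurd h (np2 (by decide))
        · by_cases h2 : c = '>'
          · subst h2
            exact List.cons_prefix_cons.mpr ⟨rfl, List.nil_prefix⟩
          · by_cases h3 : c = '"'
            · subst h3
              simp only [escCharA, if_neg (by decide : ¬ ('"' : Char) = '&'),
                if_neg (by decide : ¬ ('"' : Char) = '<'), if_neg (by decide : ¬ ('"' : Char) = '>')] at h
              exact absurd h (np2 (by decide))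
            · by_cases h4 : c = '\''
              · subst h4
                simp only [escCharA, if_neg (by decide : ¬ ('\'' : Char) = '&'),
                  if_neg (by decide : ¬ ('\'' : Char) = '<'), if_neg (by decide : ¬ ('\'' : Char) = '>'),
                  if_neg (by decide : ¬ ('\'' : Char) = '"')] at h
                exact absurd h (np2 (by decide))
              · simp only [escCharA, if_neg h1, if_neg hc, if_neg h2, if_neg h3, if_neg h4,
                  List.cons_append, List.nil_append] at h
                exact absurd h (np1 (fun e => h1 e.symm))
  | cons x X' ih =>
    intro hX w k h
    have hx := hX x (by simp)
    obtain ⟨hxa, hxl⟩ := escCharA_self_ne x hx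
    simp only [List.cons_append] at h ⊢
    match w with
    | [] => rw [tokenize_nil] at h; simp at h
    | c :: cs =>
      by_cases hc : c = '<'
      · subst hc
        cases htt : tryTag cs with
        | some inner =>
          rw [tokenize_lt_some htt, List.flatMap_cons] at h
          by_cases hidx : forms.idxOf inner < k
          · simp only [render, if_pos hidx, List.cons_append, List.append_assoc] at h
            exact absurd h (np1 hxl)
          · simp only [render, if_neg hidx, List.cons_append, List.append_assoc,
              List.nil_append] at h
            exact absurd h (np1 hxa)
        | none =>
          rw [tokenize_lt_none htt, List.flatMap_cons] at h
          simp only [render, escCharA, if_neg (by decide : ¬ ('<' : Char) = '&')] at h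
          exact absurd h (np1 hxa)
      · rw [tokenize_cons hc, List.flatMap_cons] at h
        simp only [render] at h
        by_cases h1 : c = '&'
        · subst h1
          simp only [escCharA] at h
          exact absurd h (np1 hxa)
        · by_cases h2 : c = '>'
          · subst h2
            simp only [escCharA, if_neg h1, if_neg hc] at h
            exact absurd h (np1 hxa)
          · by_cases h3 : c = '"'
            · subst h3
              simp only [escCharA, if_neg h1, if_neg hc, if_neg h2] at h
              exact absurd h (np1 hxa)
            · by_cases h4 : c = '\''
              · subst h4
                simp only [escCharA, if_neg h1, if_neg hc, if_neg h2, if_neg h3] at h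
                exact absurd h (np1 hxa)
              · simp only [escCharA, if_neg h1, if_neg hc, if_neg h2, if_neg h3, if_neg h4,
                  List.cons_append, List.nil_append] at h
                obtain ⟨rfl, h'⟩ := List.cons_prefix_cons.mp h
                have := ih (fun y hy => hX y (by simp [hy])) cs k (by simpa using h')
                exact List.cons_prefix_cons.mpr ⟨rfl, by simpa using this⟩

theorem form_mem {k : Nat} (hk : k < 16) : form k ∈ forms := by
  have h16 : forms.length = 16 := rfl
  rw [form, List.getD_eq_getElem _ _ (by omega : k < forms.length)]
  exact List.getElem_mem _

theorem idxOf_form {k : Nat} (hk : k < 16) : forms.idxOf (form k) = k := by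
  interval_cases k <;> rfl

theorem eq_form_of_idxOf {inner : List Char} {k : Nat} (hmem : inner ∈ forms)
    (h : forms.idxOf inner = k) : inner = form k := by
  have hlt : forms.idxOf inner < forms.length := List.idxOf_lt_length_iff.mpr hmem
  have hg := List.getElem_idxOf hlt
  rw [form, List.getD_eq_getElem _ _ (h ▸ hlt)]
  symm
  calc forms[k] = forms[forms.idxOf inner]'hlt := by congr 1; exact h.symm
    _ = inner := hg

theorem escSelf_form {f : List Char} (hf : f ∈ forms) : ∀ x ∈ f, escCharA x = [x] := by
  have hb : forms.all (fun f => f.all (fun x => escCharA x == [x])) = true := by rfl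
  intro x hx
  simpa using List.all_eq_true.mp (List.all_eq_true.mp hb f hf) x hx

theorem flatMap_escSelf {f : List Char} (h : ∀ x ∈ f, escCharA x = [x]) :
    f.flatMap escCharA = f := by
  induction f with
  | nil => rfl
  | cons a t ih =>
    rw [List.flatMap_cons, h a (by simp), ih (fun x hx => h x (by simp [hx]))]
    rfl

theorem skip_tagun {k : Nat} (hk : k < 16) {f : List Char} (hf : f ∈ forms) :
    skipOK ('&' :: (['l','t',';'] ++ form k ++ ['&','g','t',';'])) ('<' :: (f ++ ['>'])) = true := by
  have hb : (List.range 16).all (fun k => forms.all (fun f =>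
      skipOK ('&' :: (['l','t',';'] ++ form k ++ ['&','g','t',';'])) ('<' :: (f ++ ['>'])))) = true := by rfl
  exact List.all_eq_true.mp (List.all_eq_true.mp hb k (List.mem_range.mpr hk)) f hf

theorem skip_tagesc {k : Nat} (hk : k < 16) {f : List Char} (hf : f ∈ forms) (hne : f ≠ form k) :
    skipOK ('&' :: (['l','t',';'] ++ form k ++ ['&','g','t',';']))
      (['&','l','t',';'] ++ (f ++ ['&','g','t',';'])) = true := by
  have hb : (List.range 16).all (fun k => forms.all (fun f =>
      (f == form k) || skipOK ('&' :: (['l','t',';'] ++ form k ++ ['&','g','t',';']))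
        (['&','l','t',';'] ++ (f ++ ['&','g','t',';'])))) = true := by rfl
  have := List.all_eq_true.mp (List.all_eq_true.mp hb k (List.mem_range.mpr hk)) f hf
  simpa [hne] using this

theorem skip_ent {k : Nat} (hk : k < 16) {q : List Char}
    (hq : q ∈ ([['&','a','m','p',';'], ['&','g','t',';'], ['&','q','u','o','t',';'],
      ['&','#','x','2','7',';']] : List (List Char))) :
    skipOK ('&' :: (['l','t',';'] ++ form k ++ ['&','g','t',';'])) q = true := by
  have hb : (List.range 16).all (fun k =>
      ([['&','a','m','p',';'], ['&','g','t',';'], ['&','q','u','o','t',';'],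
        ['&','#','x','2','7',';']] : List (List Char)).all (fun q =>
        skipOK ('&' :: (['l','t',';'] ++ form k ++ ['&','g','t',';'])) q)) = true := by rfl
  exact List.all_eq_true.mp (List.all_eq_true.mp hb k (List.mem_range.mpr hk)) q hq

-- one replace pass of A advances the render stage from k to k+1
theorem step (k : Nat) (hk : k < 16) (v : List Char) :
    rep '&' (['l','t',';'] ++ form k ++ ['&','g','t',';']) ('<' :: (form k ++ ['>']))
        ((tokenize v).flatMap (render k))
      = (tokenize v).flatMap (render (k + 1)) := by
  induction v using tokenize.induct with
  | case1 => rw [tokenize_nil]; simp [rep]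
  | case2 cs inner htt ih =>
    obtain ⟨hmem, -⟩ := tryTag_some _ _ htt
    rw [tokenize_lt_some htt, List.flatMap_cons, List.flatMap_cons]
    by_cases heq : inner = form k
    · subst heq
      have hidx : forms.idxOf (form k) = k := idxOf_form hk
      rw [show render k (.tag (form k)) = ['&','l','t',';'] ++ form k ++ ['&','g','t',';'] from by
            simp [render, hidx],
          show render (k+1) (.tag (form k)) = '<' :: (form k ++ ['>']) from by
            simp [render, hidx]]
      rw [show (['&','l','t',';'] ++ form k ++ ['&','g','t',';'])
            ++ ((tokenize (cs.drop ((form k).length + 1))).flatMap (render k))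
          = '&' :: ((['l','t',';'] ++ form k ++ ['&','g','t',';'])
            ++ (tokenize (cs.drop ((form k).length + 1))).flatMap (render k)) from by simp]
      rw [rep, if_pos (by
        rw [List.isPrefixOf_iff_prefix]
        exact List.cons_prefix_cons.mpr ⟨rfl, List.prefix_append _ _⟩)]
      rw [List.drop_left, ih]
    · have hne : forms.idxOf inner ≠ k := fun e => heq (eq_form_of_idxOf hmem e)
      have hrend : render (k+1) (.tag inner) = render k (.tag inner) := by
        by_cases hj : forms.idxOf inner < k
        · simp [render, hj, Nat.lt_succ_of_lt hj]
        · have hj' : ¬ forms.idxOf inner < k + 1 := by omega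
          simp [render, hj, hj']
      rw [hrend]
      by_cases hj : forms.idxOf inner < k
      · rw [show render k (.tag inner) = '<' :: (inner ++ ['>']) from by simp [render, hj]]
        rw [rep_skip _ _ _ _ _ (skip_tagun hk hmem), ih]
      · rw [show render k (.tag inner) = ['&','l','t',';'] ++ inner ++ ['&','g','t',';'] from by
            simp [render, hj]]
        rw [List.append_assoc (['&','l','t',';']) inner (['&','g','t',';'])]
        rw [rep_skip _ _ _ _ _ (skip_tagesc hk hmem heq), ih]
  | case3 cs htt ih =>
    rw [tokenize_lt_none htt, List.flatMap_cons, List.flatMap_cons]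
    rw [show render k (.chr '<') = ['&','l','t',';'] from by simp [render, escCharA],
        show render (k+1) (.chr '<') = ['&','l','t',';'] from by simp [render, escCharA]]
    rw [rep_skip' _ _ _ _ _ ?hyp, ih]
    case hyp =>
      intro t ht hne
      rw [List.suffix_cons_iff] at ht
      rcases ht with rfl | ht
      · intro hp
        simp only [List.cons_append, List.nil_append] at hp
        obtain ⟨-, hp⟩ := List.cons_prefix_cons.mp hp
        obtain ⟨-, hp⟩ := List.cons_prefix_cons.mp hp
        obtain ⟨-, hp⟩ := List.cons_prefix_cons.mp hp
        obtain ⟨-, hp⟩ := List.cons_prefix_cons.mp hp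
        have hS := renderS (form k) (escSelf_form (form_mem hk)) cs k (by simpa using hp)
        exact absurd hS (tryTag_none cs htt (form k) (form_mem hk))
      rw [List.suffix_cons_iff] at ht
      rcases ht with rfl | ht
      · exact np1 (by decide)
      rw [List.suffix_cons_iff] at ht
      rcases ht with rfl | ht
      · exact np1 (by decide)
      rw [List.suffix_cons_iff] at ht
      rcases ht with rfl | ht
      · exact np1 (by decide)
      · rw [List.suffix_nil] at ht
        exact absurd ht hne
  | case4 c cs hc ih =>
    rw [tokenize_cons hc, List.flatMap_cons, List.flatMap_cons]
    by_cases h1 : c = '&'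
    · subst h1
      rw [show render k (.chr '&') = ['&','a','m','p',';'] from by simp [render, escCharA],
          show render (k+1) (.chr '&') = ['&','a','m','p',';'] from by simp [render, escCharA]]
      rw [rep_skip _ _ _ _ _ (skip_ent hk (by simp)), ih]
    · by_cases h2 : c = '>'
      · subst h2
        rw [show render k (.chr '>') = ['&','g','t',';'] from by simp [render, escCharA],
            show render (k+1) (.chr '>') = ['&','g','t',';'] from by simp [render, escCharA]]
        rw [rep_skip _ _ _ _ _ (skip_ent hk (by simp)), ih]
      · by_cases h3 : c = '"'
        · subst h3
          rw [show render k (.chr '"') = ['&','q','u','o','t',';'] from by simp [render, escCharA],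
              show render (k+1) (.chr '"') = ['&','q','u','o','t',';'] from by simp [render, escCharA]]
          rw [rep_skip _ _ _ _ _ (skip_ent hk (by simp)), ih]
        · by_cases h4 : c = '\''
          · subst h4
            rw [show render k (.chr '\'') = ['&','#','x','2','7',';'] from by simp [render, escCharA],
                show render (k+1) (.chr '\'') = ['&','#','x','2','7',';'] from by simp [render, escCharA]]
            rw [rep_skip _ _ _ _ _ (skip_ent hk (by simp)), ih]
          · have hesc : escCharA c = [c] := by
              simp [escCharA, h1, hc, h2, h3, h4]
            rw [show render k (.chr c) = [c] from by simp [render, hesc],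
                show render (k+1) (.chr c) = [c] from by simp [render, hesc]]
            rw [List.singleton_append, rep, if_neg (by
              rw [List.isPrefixOf_iff_prefix]
              exact np1 (fun e => h1 e.symm))]
            rw [ih]
            simp

-- stage 0 is exactly html.escape
theorem renderZero (v : List Char) : (tokenize v).flatMap (render 0) = v.flatMap escCharA := by
  induction v using tokenize.induct with
  | case1 => rw [tokenize_nil]; simp
  | case2 cs inner htt ih =>
    obtain ⟨hmem, hcs⟩ := tryTag_some _ _ htt
    rw [tokenize_lt_some htt, List.flatMap_cons, ih]
    conv_rhs => rw [show ('<' :: cs : List Char)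
      = '<' :: (inner ++ '>' :: cs.drop (inner.length + 1)) from by rw [← hcs]]
    rw [List.flatMap_cons, List.flatMap_append, List.flatMap_cons,
      flatMap_escSelf (escSelf_form hmem)]
    simp [render, escCharA]
  | case3 cs htt ih =>
    rw [tokenize_lt_none htt, List.flatMap_cons, ih, List.flatMap_cons]
    simp [render]
  | case4 c cs hc ih =>
    rw [tokenize_cons hc, List.flatMap_cons, ih, List.flatMap_cons]
    simp [render]

-- stage 16 is exactly B's single pass
theorem renderFull (v : List Char) : gscan v = (tokenize v).flatMap (render 16) := by
  induction v using tokenize.induct with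
  | case1 => rw [tokenize_nil, gscan_nil]; simp
  | case2 cs inner htt ih =>
    obtain ⟨hmem, -⟩ := tryTag_some _ _ htt
    rw [gscan_lt_some htt, tokenize_lt_some htt, List.flatMap_cons, ih]
    have hidx : forms.idxOf inner < 16 := by
      have := List.idxOf_lt_length_iff.mpr hmem
      simpa using this
    simp [render, hidx]
  | case3 cs htt ih =>
    rw [gscan_lt_none htt, tokenize_lt_none htt, List.flatMap_cons, ih, escB_eq]
    simp [render]
  | case4 c cs hc ih =>
    rw [gscan_cons hc, tokenize_cons hc, List.flatMap_cons, ih, escB_eq]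
    simp [render]

-- ===== VERDICT (by name: the statement is the Claim_ definition above) =====
theorem validate_safe_html_spec : Claim_equal_validate_safe_html := by
  intro value field_name _
  unfold Spec_validate_safe_html validate_safe_html validate_safe_html_alt
  by_cases hv : value = ""
  · simp [hv]
  · rw [if_neg hv, if_neg hv]
    apply String.toList_inj.mp
    simp only [List.foldl_cons, List.foldl_nil, PySem.Str.toList_replace]
    have p0 : ("&lt;" ++ "p" ++ "&gt;" : String).toList
        = '&' :: (['l','t',';'] ++ form 0 ++ ['&','g','t',';']) := by rfl
    have r0 : ("<" ++ "p" ++ ">" : String).toList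
        = '<' :: (form 0 ++ ['>']) := by rfl
    have p1 : ("&lt;/" ++ "p" ++ "&gt;" : String).toList
        = '&' :: (['l','t',';'] ++ form 1 ++ ['&','g','t',';']) := by rfl
    have r1 : ("</" ++ "p" ++ ">" : String).toList
        = '<' :: (form 1 ++ ['>']) := by rfl
    have p2 : ("&lt;" ++ "br" ++ "&gt;" : String).toList
        = '&' :: (['l','t',';'] ++ form 2 ++ ['&','g','t',';']) := by rfl
    have r2 : ("<" ++ "br" ++ ">" : String).toList
        = '<' :: (form 2 ++ ['>']) := by rfl
    have p3 : ("&lt;/" ++ "br" ++ "&gt;" : String).toList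
        = '&' :: (['l','t',';'] ++ form 3 ++ ['&','g','t',';']) := by rfl
    have r3 : ("</" ++ "br" ++ ">" : String).toList
        = '<' :: (form 3 ++ ['>']) := by rfl
    have p4 : ("&lt;" ++ "strong" ++ "&gt;" : String).toList
        = '&' :: (['l','t',';'] ++ form 4 ++ ['&','g','t',';']) := by rfl
    have r4 : ("<" ++ "strong" ++ ">" : String).toList
        = '<' :: (form 4 ++ ['>']) := by rfl
    have p5 : ("&lt;/" ++ "strong" ++ "&gt;" : String).toList
        = '&' :: (['l','t',';'] ++ form 5 ++ ['&','g','t',';']) := by rfl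
    have r5 : ("</" ++ "strong" ++ ">" : String).toList
        = '<' :: (form 5 ++ ['>']) := by rfl
    have p6 : ("&lt;" ++ "em" ++ "&gt;" : String).toList
        = '&' :: (['l','t',';'] ++ form 6 ++ ['&','g','t',';']) := by rfl
    have r6 : ("<" ++ "em" ++ ">" : String).toList
        = '<' :: (form 6 ++ ['>']) := by rfl
    have p7 : ("&lt;/" ++ "em" ++ "&gt;" : String).toList
        = '&' :: (['l','t',';'] ++ form 7 ++ ['&','g','t',';']) := by rfl
    have r7 : ("</" ++ "em" ++ ">" : String).toList
        = '<' :: (form 7 ++ ['>']) := by rfl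
    have p8 : ("&lt;" ++ "u" ++ "&gt;" : String).toList
        = '&' :: (['l','t',';'] ++ form 8 ++ ['&','g','t',';']) := by rfl
    have r8 : ("<" ++ "u" ++ ">" : String).toList
        = '<' :: (form 8 ++ ['>']) := by rfl
    have p9 : ("&lt;/" ++ "u" ++ "&gt;" : String).toList
        = '&' :: (['l','t',';'] ++ form 9 ++ ['&','g','t',';']) := by rfl
    have r9 : ("</" ++ "u" ++ ">" : String).toList
        = '<' :: (form 9 ++ ['>']) := by rfl
    have p10 : ("&lt;" ++ "ol" ++ "&gt;" : String).toList
        = '&' :: (['l','t',';'] ++ form 10 ++ ['&','g','t',';']) := by rfl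
    have r10 : ("<" ++ "ol" ++ ">" : String).toList
        = '<' :: (form 10 ++ ['>']) := by rfl
    have p11 : ("&lt;/" ++ "ol" ++ "&gt;" : String).toList
        = '&' :: (['l','t',';'] ++ form 11 ++ ['&','g','t',';']) := by rfl
    have r11 : ("</" ++ "ol" ++ ">" : String).toList
        = '<' :: (form 11 ++ ['>']) := by rfl
    have p12 : ("&lt;" ++ "ul" ++ "&gt;" : String).toList
        = '&' :: (['l','t',';'] ++ form 12 ++ ['&','g','t',';']) := by rfl
    have r12 : ("<" ++ "ul" ++ ">" : String).toList
        = '<' :: (form 12 ++ ['>']) := by rfl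
    have p13 : ("&lt;/" ++ "ul" ++ "&gt;" : String).toList
        = '&' :: (['l','t',';'] ++ form 13 ++ ['&','g','t',';']) := by rfl
    have r13 : ("</" ++ "ul" ++ ">" : String).toList
        = '<' :: (form 13 ++ ['>']) := by rfl
    have p14 : ("&lt;" ++ "li" ++ "&gt;" : String).toList
        = '&' :: (['l','t',';'] ++ form 14 ++ ['&','g','t',';']) := by rfl
    have r14 : ("<" ++ "li" ++ ">" : String).toList
        = '<' :: (form 14 ++ ['>']) := by rfl
    have p15 : ("&lt;/" ++ "li" ++ "&gt;" : String).toList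
        = '&' :: (['l','t',';'] ++ form 15 ++ ['&','g','t',';']) := by rfl
    have r15 : ("</" ++ "li" ++ ">" : String).toList
        = '<' :: (form 15 ++ ['>']) := by rfl
    rw [p0, r0, p1, r1, p2, r2, p3, r3, p4, r4, p5, r5, p6, r6, p7, r7,
        p8, r8, p9, r9, p10, r10, p11, r11, p12, r12, p13, r13, p14, r14, p15, r15]
    simp only [replace_eq_rep]
    have hesc : (htmlEscape value).toList = value.toList.flatMap escCharA := by
      simp [htmlEscape]
    rw [hesc, ← renderZero value.toList]
    rw [step 0 (by omega) value.toList]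
    rw [step 1 (by omega) value.toList]
    rw [step 2 (by omega) value.toList]
    rw [step 3 (by omega) value.toList]
    rw [step 4 (by omega) value.toList]
    rw [step 5 (by omega) value.toList]
    rw [step 6 (by omega) value.toList]
    rw [step 7 (by omega) value.toList]
    rw [step 8 (by omega) value.toList]
    rw [step 9 (by omega) value.toList]
    rw [step 10 (by omega) value.toList]
    rw [step 11 (by omega) value.toList]
    rw [step 12 (by omega) value.toList]
    rw [step 13 (by omega) value.toList]
    rw [step 14 (by omega) value.toList]
    rw [step 15 (by omega) value.toList]
    rw [renderFull value.toList]
    simp
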